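-- pv_equiv track=rewrite | github.com/mserra0/CoSMo-ComicsPSS | CoSMo/utils/metrics.py | boundaries_to_segmentation
-- ===== SOURCE A (Python) =====
-- def boundaries_to_segmentation(boundaries):
--     """
--     Convert boundary indicators to a list of segment sets.
--
--     """
--     segments = []
--     current_segment = set()
--     num_items = len(boundaries)
--
--     for i in range(num_items):
--         is_start_of_new_segment = (boundaries[i] == 1)
--
--         if is_start_of_new_segment:
--             if i > 0 and current_segment:
--                 segments.append(current_segment)
--             current_segment = set()
--
--         current_segment.add(i)
--
--     if current_segment:
--         segments.append(current_segment)
--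
--     return segments
-- ===== SOURCE B (Python) =====
-- def boundaries_to_segmentation(boundaries):
--     """Convert boundary indicators to a list of segment sets (cut-point construction)."""
--     if not boundaries:
--         return []
--     n = len(boundaries)
--     starts = [0] + [i for i in range(1, n) if boundaries[i] == 1]
--     ends = starts[1:] + [n]
--     return [set(range(s, e)) for s, e in zip(starts, ends)]
-- ===== Notes on version B (the rewrite author's own statement) =====
-- stated objective: alternative
-- what changed: Replaced A's single accumulator-threaded loop (growing the current segment element by element and flushing it at each boundary) by a two-phase construction: first collect the cut-point indices (0 plus every i>0 with boundaries[i] == 1), then emit one set(range(s, e)) per consecutive pair of cut points.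
import Mathlib
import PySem

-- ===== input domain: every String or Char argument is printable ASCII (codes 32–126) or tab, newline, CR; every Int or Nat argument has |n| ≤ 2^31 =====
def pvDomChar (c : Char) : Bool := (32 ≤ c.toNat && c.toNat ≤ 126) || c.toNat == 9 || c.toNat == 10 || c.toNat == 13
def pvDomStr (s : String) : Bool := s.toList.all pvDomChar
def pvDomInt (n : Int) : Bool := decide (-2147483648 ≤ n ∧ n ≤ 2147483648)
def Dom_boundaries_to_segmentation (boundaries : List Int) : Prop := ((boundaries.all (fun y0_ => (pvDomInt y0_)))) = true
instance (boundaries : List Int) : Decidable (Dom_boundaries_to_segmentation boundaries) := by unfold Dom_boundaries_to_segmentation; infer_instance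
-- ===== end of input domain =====

-- B replaces A's accumulator-threaded single loop by a two-phase construction
-- (collect the cut points first, then emit one range per consecutive pair); objective: alternative.

-- ===== PORT A =====
-- one loop step of A's for-loop: state = (segments, current_segment)
def btsStepA (boundaries : List Int) (st : List (List Int) × List Int) (i : Int) :
    List (List Int) × List Int :=
  let is_start := PySem.List.pyGet? boundaries i == some 1
  let st2 := if is_start then
      ((if 0 < i ∧ st.2 ≠ [] then st.1 ++ [st.2] else st.1), ([] : List Int))
    else st
  (st2.1, PySem.Set.add st2.2 i)

def boundaries_to_segmentation (boundaries : List Int) : List (List Int) :=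
  let num_items : Int := boundaries.length
  let st := (PySem.List.pyRange 0 num_items).foldl (btsStepA boundaries) ([], [])
  if st.2 ≠ [] then st.1 ++ [st.2] else st.1

-- ===== PORT B =====
def boundaries_to_segmentation_alt (boundaries : List Int) : List (List Int) :=
  if boundaries = [] then []
  else
    let n : Int := boundaries.length
    let starts : List Int :=
      0 :: (PySem.List.pyRange 1 n).filter (fun i => PySem.List.pyGet? boundaries i == some 1)
    let ends := starts.tail ++ [n]
    (starts.zip ends).map (fun p => PySem.List.pyRange p.1 p.2)

-- ===== PRECONDITION & SPEC =====
def Spec_boundaries_to_segmentation (boundaries : List Int) (out : List (List Int)) : Prop := out = boundaries_to_segmentation_alt boundaries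
instance (boundaries : List Int) (out : List (List Int)) : Decidable (Spec_boundaries_to_segmentation boundaries out) := by unfold Spec_boundaries_to_segmentation; infer_instance

-- ===== CLAIM (what is proved, stated in full; the proofs are below) =====
def Claim_equal_boundaries_to_segmentation : Prop := ∀ (boundaries : List Int), Dom_boundaries_to_segmentation boundaries → Spec_boundaries_to_segmentation boundaries (boundaries_to_segmentation boundaries)

-- ===== LEMMAS AND PROOFS =====

-- index n is a cut point recorded by the loop (0 is never one here: range(1, n))
def btsCut (boundaries : List Int) (n : Nat) : Bool :=
  decide (1 ≤ n) && (PySem.List.pyGet? boundaries (n : Int) == some 1)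

-- start index of the segment that is open after processing indices [0, n)
def btsLast (boundaries : List Int) : Nat → Nat
  | 0 => 0
  | n + 1 => if btsCut boundaries n then n else btsLast boundaries n

-- completed segments after processing indices [0, n)
def btsSegs (boundaries : List Int) : Nat → List (List Int)
  | 0 => []
  | n + 1 => if btsCut boundaries n then
      btsSegs boundaries n ++ [PySem.List.pyRange (btsLast boundaries n : Int) (n : Int)]
    else btsSegs boundaries n

-- B's cut-point list for the prefix [0, n)
def btsStarts (boundaries : List Int) : Nat → List Int
  | 0 => [0]
  | n + 1 => if btsCut boundaries n then btsStarts boundaries n ++ [(n : Int)]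
    else btsStarts boundaries n

-- B's phase 2 applied to a cut list with final end e
def btsZip (l : List Int) (e : Int) : List (List Int) :=
  (l.zip (l.tail ++ [e])).map (fun p => PySem.List.pyRange p.1 p.2)

theorem btsLast_le (boundaries : List Int) (n : Nat) : btsLast boundaries n ≤ n := by
  induction n with
  | zero => simp [btsLast]
  | succ n ih => simp only [btsLast]; split <;> omega

theorem btsLast_lt (boundaries : List Int) (n : Nat) (h : 1 ≤ n) :
    btsLast boundaries n < n := by
  cases n with
  | zero => omega
  | succ n =>
    have := btsLast_le boundaries n
    simp only [btsLast]; split <;> omega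

theorem btsRange_ne_nil (boundaries : List Int) (n : Nat) (h : 1 ≤ n) :
    PySem.List.pyRange (btsLast boundaries n : Int) (n : Int) ≠ [] := by
  have hlt : btsLast boundaries n < n := btsLast_lt boundaries n h
  intro hnil
  have : (btsLast boundaries n : Int) ∈ PySem.List.pyRange (btsLast boundaries n : Int) (n : Int) := by
    rw [PySem.List.mem_pyRange_one]
    constructor
    · exact le_refl _
    · exact_mod_cast hlt
  rw [hnil] at this
  simp at this

-- the invariant of A's loop
theorem btsFold_inv (boundaries : List Int) (n : Nat) :
    (List.foldl (btsStepA boundaries) ([], []) (PySem.List.pyRange 0 (n : Int)))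
      = (btsSegs boundaries n,
         PySem.List.pyRange (btsLast boundaries n : Int) (n : Int)) := by
  induction n with
  | zero =>
    have h0 : PySem.List.pyRange (0 : Int) ((0 : Nat) : Int) = [] := by decide
    rw [h0]
    simp [btsSegs, btsLast]
  | succ n ih =>
    have hstep : PySem.List.pyRange 0 ((n + 1 : Nat) : Int)
        = PySem.List.pyRange 0 (n : Int) ++ [(n : Int)] := by
      have h0n : (0 : Int) ≤ (n : Int) := by positivity
      rw [show ((n + 1 : Nat) : Int) = (n : Int) + 1 by push_cast; ring]
      exact PySem.List.pyRange_one_succ_right h0n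
    rw [hstep, List.foldl_append, ih]
    have hle : (btsLast boundaries n : Int) ≤ (n : Int) := by
      exact_mod_cast btsLast_le boundaries n
    have hnotmem : (n : Int) ∉ PySem.List.pyRange (btsLast boundaries n : Int) (n : Int) := by
      intro hm
      have := (PySem.List.mem_pyRange_one).1 hm
      omega
    have hadd : PySem.Set.add (PySem.List.pyRange (btsLast boundaries n : Int) (n : Int)) (n : Int)
        = PySem.List.pyRange (btsLast boundaries n : Int) ((n : Int) + 1) := by
      rw [PySem.List.pyRange_one_succ_right hle, PySem.Set.add]
      rw [if_neg (by simp [hnotmem])]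
    simp only [List.foldl_cons, List.foldl_nil, btsStepA]
    by_cases hc : (PySem.List.pyGet? boundaries (n : Int) == some 1) = true
    · rw [if_pos hc]
      by_cases hn : 1 ≤ n
      · have hcut : btsCut boundaries n = true := by
          unfold btsCut; rw [hc]; simp [hn]
        rw [if_pos ⟨by exact_mod_cast hn, btsRange_ne_nil boundaries n hn⟩]
        simp only [btsSegs, btsLast, hcut, if_pos, Prod.mk.injEq]
        refine ⟨trivial, ?_⟩
        rw [PySem.Set.add]
        simp only [List.nil_append]
        have hc1 : ((n + 1 : Nat) : Int) = (n : Int) + 1 := by push_cast; ring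
        rw [hc1, PySem.List.pyRange_one_succ_right (le_refl ((n : Int)))]
        have h1 : PySem.List.pyRange ((n : Nat) : Int) (n : Int) = [] := by
          refine List.eq_nil_iff_forall_not_mem.2 ?_
          intro x hx
          have := (PySem.List.mem_pyRange_one).1 hx
          omega
        rw [h1]
        simp
      · -- n = 0 : first iteration, current_segment is empty, no append
        have hn0 : n = 0 := by omega
        subst hn0
        have hcut : btsCut boundaries 0 = false := by unfold btsCut; simp
        have hb0 : btsLast boundaries 0 = 0 := rfl
        rw [if_neg (by rw [hb0]; decide)]
        simp only [btsSegs, btsLast, hcut, if_neg Bool.false_ne_true, Prod.mk.injEq]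
        refine ⟨trivial, ?_⟩
        decide
    · rw [if_neg hc]
      have hc' : (PySem.List.pyGet? boundaries (n : Int) == some 1) = false := by
        simpa using hc
      have hcut : btsCut boundaries n = false := by
        unfold btsCut; rw [hc']; simp
      simp only [btsSegs, btsLast, hcut, if_neg Bool.false_ne_true, Prod.mk.injEq]
      refine ⟨trivial, ?_⟩
      rw [hadd]
      norm_cast

theorem btsStarts_ne_nil (boundaries : List Int) (n : Nat) :
    btsStarts boundaries n ≠ [] := by
  induction n with
  | zero => simp [btsStarts]
  | succ n ih => simp only [btsStarts]; split <;> simp [ih]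

theorem btsZip_append (l : List Int) (m e : Int) (hl : l ≠ []) :
    btsZip (l ++ [m]) e = btsZip l m ++ [PySem.List.pyRange m e] := by
  unfold btsZip
  have htail : (l ++ [m]).tail = l.tail ++ [m] := by
    cases l with
    | nil => exact absurd rfl hl
    | cons a t => simp
  have hlen : l.length = (l.tail ++ [m]).length := by
    cases l with
    | nil => exact absurd rfl hl
    | cons a t => simp
  rw [htail, show l.tail ++ [m] ++ [e] = (l.tail ++ [m]) ++ [e] from rfl,
    List.zip_append hlen]
  simp

-- B's phase 2 on the cut list equals A's completed segments plus the open one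
theorem btsZip_eq (boundaries : List Int) (n : Nat) (e : Int) :
    btsZip (btsStarts boundaries n) e
      = btsSegs boundaries n ++ [PySem.List.pyRange (btsLast boundaries n : Int) e] := by
  induction n generalizing e with
  | zero => simp [btsStarts, btsZip, btsSegs, btsLast]
  | succ n ih =>
    by_cases hc : btsCut boundaries n = true
    · simp only [btsStarts, btsSegs, btsLast, hc, if_pos]
      rw [btsZip_append _ _ _ (btsStarts_ne_nil boundaries n), ih ((n : Int))]
    · simp only [btsStarts, btsSegs, btsLast]
      rw [if_neg hc, if_neg hc, if_neg hc]
      exact ih e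

-- B's starts list is btsStarts of the full length
theorem btsStarts_eq (boundaries : List Int) (n : Nat) :
    (0 : Int) :: (PySem.List.pyRange 1 (n : Int)).filter
        (fun i => PySem.List.pyGet? boundaries i == some 1)
      = btsStarts boundaries n := by
  induction n with
  | zero =>
    have h0 : PySem.List.pyRange (1 : Int) ((0 : Nat) : Int) = [] := by decide
    rw [h0]
    simp [btsStarts]
  | succ n ih =>
    by_cases hn : 1 ≤ n
    · have h1 : (1 : Int) ≤ (n : Int) := by exact_mod_cast hn
      rw [show ((n + 1 : Nat) : Int) = (n : Int) + 1 by push_cast; ring,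
        PySem.List.pyRange_one_succ_right h1, List.filter_append]
      simp only [btsStarts]
      by_cases hc : (PySem.List.pyGet? boundaries (n : Int) == some 1) = true
      · have hcut : btsCut boundaries n = true := by unfold btsCut; rw [hc]; simp [hn]
        rw [hcut, if_pos rfl, ← ih]
        simp only [List.filter_cons, List.filter_nil, hc, if_pos]
        simp
      · have hc' : (PySem.List.pyGet? boundaries (n : Int) == some 1) = false := by
          simpa using hc
        have hcut : btsCut boundaries n = false := by unfold btsCut; rw [hc']; simp
        rw [hcut, if_neg Bool.false_ne_true, ← ih]
        simp only [List.filter_cons, List.filter_nil, hc']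
        simp
    · have hn0 : n = 0 := by omega
      subst hn0
      have hcut : btsCut boundaries 0 = false := by unfold btsCut; simp
      have h1 : PySem.List.pyRange (1 : Int) ((1 : Nat) : Int) = [] := by decide
      rw [h1]
      simp [btsStarts, hcut]

-- ===== VERDICT (by name: the statement is the Claim_ definition above) =====
theorem boundaries_to_segmentation_spec : Claim_equal_boundaries_to_segmentation := by
  intro boundaries _
  unfold Spec_boundaries_to_segmentation boundaries_to_segmentation boundaries_to_segmentation_alt
  rcases hB : boundaries with _ | ⟨a, t⟩
  · decide
  · rw [← hB]
    have hne : boundaries ≠ [] := by rw [hB]; simp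
    rw [if_neg hne]
    set n := boundaries.length with hn
    have hn1 : 1 ≤ n := by rw [hn, hB]; simp
    simp only
    rw [btsFold_inv, btsStarts_eq]
    rw [if_pos (btsRange_ne_nil boundaries n hn1)]
    exact (btsZip_eq boundaries n ((n : Nat) : Int)).symm
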